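-- pv_equiv track=rewrite | github.com/mcmarius/ro-textbook-parser | stats.py | count_multitask
-- ===== SOURCE A (Python) =====
-- def count_multitask(exercises):
--     new_exercises = []
--     for exercise in exercises:
--         if '/' not in exercise[4]:
--             continue
--         labels = exercise[4].split('/')
--         new_exercise = list(exercise)
--         if ('remember' in labels or 'understand' in labels) and ('evaluate' in labels or 'create' in labels) and ('apply' not in labels and 'analyze' not in labels):
--             new_exercise[4] = 'L1,L2 + L5,L6'
--         elif ('remember' in labels or 'understand' in labels) and ('evaluate' not in labels and 'create' not in labels) and ('apply' in labels or 'analyze' in labels):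
--             new_exercise[4] = 'L1,L2 + L3,L4'
--         elif ('remember' not in labels and 'understand' not in labels) and ('evaluate' in labels or 'create' in labels) and ('apply' in labels or 'analyze' in labels):
--             new_exercise[4] = 'L3,L4 + L5,L6'
--         else:
--             new_exercise[4] = 'other'
--         new_exercises.append(new_exercise)
--     return new_exercises
-- ===== SOURCE B (Python) =====
-- _BAND = {'remember': 'L1,L2', 'understand': 'L1,L2',
--          'apply': 'L3,L4', 'analyze': 'L3,L4',
--          'evaluate': 'L5,L6', 'create': 'L5,L6'}
--
--
-- def count_multitask(exercises):
--     return [ex[:4] + [_bloom(ex[4].split('/'))] + ex[5:]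
--             for ex in exercises if '/' in ex[4]]
--
--
-- def _bloom(labels):
--     # Map each recognised label to its Bloom band name, dedup, and sort;
--     # the exercise is a genuine two-band combination iff exactly two
--     # distinct bands occur, and its name is then the join of the two.
--     bands = sorted({_BAND[l] for l in labels if l in _BAND})
--     return ' + '.join(bands) if len(bands) == 2 else 'other'
-- ===== Notes on version B (the rewrite author's own statement) =====
-- stated objective: alternative
-- what changed: Instead of A's six-way boolean if/elif chain over hard-coded combination strings, B maps each label to its Bloom band name via a dict, dedups and sorts the bands, and SYNTHESIZES the combination string by joining exactly two bands with ' + ' (else 'other'); rows are built as ex[:4]+[label]+ex[5:] in a comprehension rather than copy-and-assign in an accumulator loop.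
import Mathlib
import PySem

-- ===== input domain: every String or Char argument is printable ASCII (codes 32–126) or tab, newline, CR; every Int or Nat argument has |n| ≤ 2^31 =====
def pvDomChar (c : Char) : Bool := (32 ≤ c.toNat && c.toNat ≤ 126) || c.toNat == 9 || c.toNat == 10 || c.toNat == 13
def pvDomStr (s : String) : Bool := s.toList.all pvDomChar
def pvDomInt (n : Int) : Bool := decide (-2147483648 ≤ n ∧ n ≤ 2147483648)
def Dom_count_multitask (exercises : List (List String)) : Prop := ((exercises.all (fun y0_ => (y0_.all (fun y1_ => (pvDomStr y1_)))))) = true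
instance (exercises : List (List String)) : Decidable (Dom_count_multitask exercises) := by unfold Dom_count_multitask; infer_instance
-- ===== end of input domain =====

-- B replaces A's six-way if/elif chain over hard-coded combination strings by mapping each
-- label to its Bloom band name, dedup+sort, and joining exactly two bands with ' + '; objective: alternative.

-- ===== PORT A =====
def count_multitask (exercises : List (List String)) : List (List String) :=
  exercises.foldl (fun new_exercises exercise =>
    match PySem.List.pyGet? exercise 4 with
    | none => new_exercises  -- Python raises IndexError here; excluded by Pre_
    | some e4 =>
      if PySem.Str.isIn "/" e4 = false then new_exercises
      else
        let labels := (PySem.Str.split? e4 "/").getD []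
        let new_exercise :=
          if (labels.contains "remember" || labels.contains "understand") &&
             (labels.contains "evaluate" || labels.contains "create") &&
             (!labels.contains "apply" && !labels.contains "analyze") then
            exercise.set 4 "L1,L2 + L5,L6"
          else if (labels.contains "remember" || labels.contains "understand") &&
                  (!labels.contains "evaluate" && !labels.contains "create") &&
                  (labels.contains "apply" || labels.contains "analyze") then
            exercise.set 4 "L1,L2 + L3,L4"
          else if (!labels.contains "remember" && !labels.contains "understand") &&
                  (labels.contains "evaluate" || labels.contains "create") &&
                  (labels.contains "apply" || labels.contains "analyze") then
            exercise.set 4 "L3,L4 + L5,L6"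
          else
            exercise.set 4 "other"
        new_exercises ++ [new_exercise]) []

-- ===== PORT B =====
def bandDict : PySem.Dict String String :=
  PySem.Dict.mk [("remember", "L1,L2"), ("understand", "L1,L2"),
                 ("apply", "L3,L4"), ("analyze", "L3,L4"),
                 ("evaluate", "L5,L6"), ("create", "L5,L6")]

-- {_BAND[l] for l in labels if l in _BAND} → Set.ofList of the filterMap; sorted; ' + '.join
def bloomLabel (labels : List String) : String :=
  let bands := PySem.List.sorted
      (PySem.Set.ofList (labels.filterMap (fun l => PySem.Dict.get? bandDict l)))
      (fun x => x) false
  if bands.length = 2 then PySem.Str.join " + " bands else "other"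

def count_multitask_alt (exercises : List (List String)) : List (List String) :=
  (exercises.filter (fun ex => PySem.Str.isIn "/" (PySem.List.pyGetD ex 4 ""))).map
    (fun ex =>
      PySem.List.slice ex none (some 4)
        ++ [bloomLabel ((PySem.Str.split? (PySem.List.pyGetD ex 4 "") "/").getD [])]
        ++ PySem.List.slice ex (some 5) none)

-- ===== PRECONDITION & SPEC =====
-- Pre_ excludes inputs where some exercise has fewer than 5 fields: there Python A raises IndexError on exercise[4].
def Pre_count_multitask (exercises : List (List String)) : Prop :=
  ∀ ex ∈ exercises, 5 ≤ ex.length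
instance (exercises : List (List String)) : Decidable (Pre_count_multitask exercises) := by unfold Pre_count_multitask; infer_instance

def pvWitness_count_multitask : List (List String) :=
  [["1", "a", "b", "c", "remember/apply", "z"], ["2", "a", "b", "c", "plain"]]

def Spec_count_multitask (exercises : List (List String)) (out : List (List String)) : Prop := out = count_multitask_alt exercises
instance (exercises : List (List String)) (out : List (List String)) : Decidable (Spec_count_multitask exercises out) := by unfold Spec_count_multitask; infer_instance

-- ===== CLAIM (what is proved, stated in full; the proofs are below) =====
def Claim_equal_count_multitask : Prop := ∀ (exercises : List (List String)), Dom_count_multitask exercises → Pre_count_multitask exercises → Spec_count_multitask exercises (count_multitask exercises)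

-- ===== LEMMAS AND PROOFS =====

-- literal lookup in the band dict, as an if-chain
lemma bandGet_eq (l : String) :
    PySem.Dict.get? bandDict l =
      if l = "remember" then some "L1,L2" else if l = "understand" then some "L1,L2"
      else if l = "apply" then some "L3,L4" else if l = "analyze" then some "L3,L4"
      else if l = "evaluate" then some "L5,L6" else if l = "create" then some "L5,L6"
      else none := by
  simp only [bandDict, PySem.Dict.get?_mk_cons, beq_iff_eq]
  split_ifs with h1 h2 h3 h4 h5 h6 <;> first | rfl | simp_all [eq_comm]

-- membership in the mapped-band list, in terms of the six label memberships
lemma mem_filterMap_band (labels : List String) (x : String) :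
    x ∈ labels.filterMap (fun l => PySem.Dict.get? bandDict l) ↔
      (x = "L1,L2" ∧ ("remember" ∈ labels ∨ "understand" ∈ labels)) ∨
      (x = "L3,L4" ∧ ("apply" ∈ labels ∨ "analyze" ∈ labels)) ∨
      (x = "L5,L6" ∧ ("evaluate" ∈ labels ∨ "create" ∈ labels)) := by
  simp only [List.mem_filterMap, bandGet_eq]
  constructor
  · rintro ⟨l, hl, h⟩
    split_ifs at h <;> simp_all
  · rintro (⟨rfl, h | h⟩ | ⟨rfl, h | h⟩ | ⟨rfl, h | h⟩) <;>
      exact ⟨_, h, by simp⟩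

-- sorted(set of band names) as an explicit list of the present bands
lemma bands_eq (labels : List String) :
    PySem.List.sorted
      (PySem.Set.ofList (labels.filterMap (fun l => PySem.Dict.get? bandDict l)))
      (fun x => x) false
    = (if labels.contains "remember" || labels.contains "understand" then ["L1,L2"] else [])
      ++ (if labels.contains "apply" || labels.contains "analyze" then ["L3,L4"] else [])
      ++ (if labels.contains "evaluate" || labels.contains "create" then ["L5,L6"] else []) := by
  apply PySem.List.sorted_eq_of_perm_of_pairwise_lt
  · rw [List.perm_ext_iff_of_nodup _ (PySem.Set.nodup_ofList _)]
    · intro a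
      simp only [PySem.Set.mem_ofList, mem_filterMap_band, List.mem_append, List.mem_ite_nil_right,
        List.mem_singleton, Bool.or_eq_true, List.contains_iff_mem]
      tauto
    · split_ifs <;> simp
  · split_ifs <;> simp <;> decide

-- A's six-way if/elif chain computes B's band-synthesised label
lemma bloom_eq (labels : List String) :
    (if (labels.contains "remember" || labels.contains "understand") &&
        (labels.contains "evaluate" || labels.contains "create") &&
        (!labels.contains "apply" && !labels.contains "analyze") then "L1,L2 + L5,L6"
     else if (labels.contains "remember" || labels.contains "understand") &&
             (!labels.contains "evaluate" && !labels.contains "create") &&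
             (labels.contains "apply" || labels.contains "analyze") then "L1,L2 + L3,L4"
     else if (!labels.contains "remember" && !labels.contains "understand") &&
             (labels.contains "evaluate" || labels.contains "create") &&
             (labels.contains "apply" || labels.contains "analyze") then "L3,L4 + L5,L6"
     else "other")
    = bloomLabel labels := by
  unfold bloomLabel
  rw [bands_eq]
  cases hr : labels.contains "remember" <;> cases hu : labels.contains "understand" <;>
    cases hap : labels.contains "apply" <;> cases han : labels.contains "analyze" <;>
    cases he : labels.contains "evaluate" <;> cases hc : labels.contains "create" <;> rfl

-- with 4 < length, the copy-and-assign equals take 4 ++ [x] ++ drop 5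
lemma set_four_eq (ex : List String) (h : 5 ≤ ex.length) (x : String) :
    ex.set 4 x = PySem.List.slice ex none (some 4) ++ [x] ++ PySem.List.slice ex (some 5) none := by
  rw [show PySem.List.slice ex none (some 4) = ex.take (4 : Int).toNat from
        PySem.List.slice_to ex (by norm_num),
      show PySem.List.slice ex (some 5) none = ex.drop (5 : Int).toNat from
        PySem.List.slice_from ex (by norm_num)]
  simp [List.set_eq_take_append_cons_drop, show 4 < ex.length by omega]

lemma step_elem_eq (ex : List String) (h : 5 ≤ ex.length) (e4 : String)
    (he : PySem.List.pyGet? ex 4 = some e4) :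
    (let labels := (PySem.Str.split? e4 "/").getD []
     if (labels.contains "remember" || labels.contains "understand") &&
        (labels.contains "evaluate" || labels.contains "create") &&
        (!labels.contains "apply" && !labels.contains "analyze") then
       ex.set 4 "L1,L2 + L5,L6"
     else if (labels.contains "remember" || labels.contains "understand") &&
             (!labels.contains "evaluate" && !labels.contains "create") &&
             (labels.contains "apply" || labels.contains "analyze") then
       ex.set 4 "L1,L2 + L3,L4"
     else if (!labels.contains "remember" && !labels.contains "understand") &&
             (labels.contains "evaluate" || labels.contains "create") &&
             (labels.contains "apply" || labels.contains "analyze") then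
       ex.set 4 "L3,L4 + L5,L6"
     else
       ex.set 4 "other")
    = PySem.List.slice ex none (some 4)
        ++ [bloomLabel ((PySem.Str.split? (PySem.List.pyGetD ex 4 "") "/").getD [])]
        ++ PySem.List.slice ex (some 5) none := by
  have hD : PySem.List.pyGetD ex 4 "" = e4 := by
    simp [PySem.List.pyGetD, he]
  rw [hD]
  have key : ∀ labels : List String,
      (if (labels.contains "remember" || labels.contains "understand") &&
          (labels.contains "evaluate" || labels.contains "create") &&
          (!labels.contains "apply" && !labels.contains "analyze") then
         ex.set 4 "L1,L2 + L5,L6"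
       else if (labels.contains "remember" || labels.contains "understand") &&
               (!labels.contains "evaluate" && !labels.contains "create") &&
               (labels.contains "apply" || labels.contains "analyze") then
         ex.set 4 "L1,L2 + L3,L4"
       else if (!labels.contains "remember" && !labels.contains "understand") &&
               (labels.contains "evaluate" || labels.contains "create") &&
               (labels.contains "apply" || labels.contains "analyze") then
         ex.set 4 "L3,L4 + L5,L6"
       else
         ex.set 4 "other")
      = PySem.List.slice ex none (some 4) ++ [bloomLabel labels]
          ++ PySem.List.slice ex (some 5) none := by
    intro labels
    rw [← bloom_eq]
    split_ifs <;> rw [set_four_eq ex h]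
  exact key _

lemma pyGet?_four (ex : List String) (h : 5 ≤ ex.length) :
    PySem.List.pyGet? ex 4 = some (ex.getD 4 "") := by
  have h4 : PySem.List.pyIdx? ex.length 4 = some 4 := by
    simp [PySem.List.pyIdx?]; omega
  simp [PySem.List.pyGet?, h4, List.getElem?_eq_getElem (show 4 < ex.length by omega),
    List.getD_eq_getElem?_getD]

-- ===== VERDICT (by name: the statement is the Claim_ definition above) =====
theorem count_multitask_spec : Claim_equal_count_multitask := by
  intro exercises _ hpre
  unfold Spec_count_multitask count_multitask count_multitask_alt
  rw [PySem.List.foldl_congr_mem (g := fun acc ex =>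
    if PySem.Str.isIn "/" (PySem.List.pyGetD ex 4 "") then
      acc ++ [PySem.List.slice ex none (some 4)
        ++ [bloomLabel ((PySem.Str.split? (PySem.List.pyGetD ex 4 "") "/").getD [])]
        ++ PySem.List.slice ex (some 5) none]
    else acc)]
  · rw [PySem.List.foldl_append_if]
    simp
  · intro acc ex hmem
    have hlen := hpre ex hmem
    have hg := pyGet?_four ex hlen
    have hD : PySem.List.pyGetD ex 4 "" = ex.getD 4 "" := by
      simp [PySem.List.pyGetD, hg]
    rw [hg]
    rcases hin : PySem.Str.isIn "/" (PySem.List.pyGetD ex 4 "") with _ | _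
    · rw [hD] at hin
      simp only [hin]
      simp
    · simp only [hD ▸ hin]
      simp only [Bool.true_eq_false, if_false, if_true]
      rw [step_elem_eq ex hlen _ hg]
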